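-- pv_equiv track=rewrite | github.com/jalbertovg17/Epam_MXLab | app.py | looks_like_strong_id_name
-- ===== SOURCE A (Python) =====
-- STRONG_ID_TOKENS = {
--     "nb",
--     "trade", "tradeid",
--     "contract", "contractid", "contractnumber",
--     "deal", "dealid",
--     "order", "orderid",
--     "transaction", "transactionid",
--     "position", "positionid",
--     "booking", "bookingid",
-- }
--
-- def _norm_name(col: str) -> str:
--     return (
--         str(col).strip().lower()
--         .replace(" ", "")
--         .replace("-", "")
--         .replace(".", "")
--         .replace("/", "")
--         .replace("\\", "")
--         .replace("_", "")
--     )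
--
-- def looks_like_strong_id_name(col: str) -> bool:
--     n = _norm_name(col)
--     if n == "nb" or n.startswith("nb") or n.endswith("nb") or "nb" in n:
--         return True
--     if "trade" in n:
--         return True
--     if "contract" in n:
--         return True
--     for tok in STRONG_ID_TOKENS:
--         if tok != "nb" and tok in n:
--             return True
--     return False
-- ===== SOURCE B (Python) =====
-- _TOKENS = ("nb", "trade", "contract", "deal", "order", "transaction", "position", "booking")
-- _DROP = " -./\\_"
--
-- def looks_like_strong_id_name(col: str) -> bool:
--     # single-pass NFA simulation: 'states' holds the still-to-match suffixes of
--     # partially matched tokens; normalization (dropping separators) is fused in.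
--     states = []
--     for ch in str(col).strip().lower():
--         if ch in _DROP:
--             continue
--         nxt = []
--         for s in states:
--             if s[0] == ch:
--                 rest = s[1:]
--                 if not rest:
--                     return True
--                 nxt.append(rest)
--         for t in _TOKENS:
--             if t[0] == ch:
--                 rest = t[1:]
--                 if not rest:
--                     return True
--                 nxt.append(rest)
--         states = nxt
--     return False
-- ===== Notes on version B (the rewrite author's own statement) =====
-- stated objective: alternative
-- what changed: Replaces A's chained .replace normalization plus repeated substring tests (special-case nb/trade/contract blocks and a loop over 16 tokens) with a single left-to-right pass that skips separator characters on the fly and simulates an NFA: it maintains the set of still-to-match suffixes of partially matched tokens and accepts when one is consumed, never calling a substring test.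
import Mathlib
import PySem

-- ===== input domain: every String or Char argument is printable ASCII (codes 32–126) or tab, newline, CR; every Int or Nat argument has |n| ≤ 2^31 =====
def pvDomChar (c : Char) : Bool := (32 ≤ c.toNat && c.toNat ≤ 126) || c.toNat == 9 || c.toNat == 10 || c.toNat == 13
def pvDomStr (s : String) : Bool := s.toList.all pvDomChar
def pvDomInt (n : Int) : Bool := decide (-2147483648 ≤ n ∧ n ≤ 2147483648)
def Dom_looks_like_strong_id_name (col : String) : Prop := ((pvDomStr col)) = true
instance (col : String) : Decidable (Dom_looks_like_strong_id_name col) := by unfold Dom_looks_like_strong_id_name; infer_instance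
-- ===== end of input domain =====

-- B replaces the chained replaces + repeated substring tests with one left-to-right pass
-- that skips separators on the fly and simulates an NFA over partially matched token
-- suffixes; same result, no speed claim ("alternative").

-- ===== PORT A =====
def STRONG_ID_TOKENS : PySem.Set String := PySem.Set.ofList
  ["nb", "trade", "tradeid", "contract", "contractid", "contractnumber",
   "deal", "dealid", "order", "orderid", "transaction", "transactionid",
   "position", "positionid", "booking", "bookingid"]

def pvNormName (col : String) : String :=
  PySem.Str.replace (PySem.Str.replace (PySem.Str.replace (PySem.Str.replace (PySem.Str.replace
    (PySem.Str.replace (PySem.Str.lower (PySem.Str.strip col)) " " "") "-" "") "." "") "/" "")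
    "\\" "") "_" ""

def looks_like_strong_id_name (col : String) : Bool :=
  let n := pvNormName col
  if n == "nb" || PySem.Str.startswith n "nb" || PySem.Str.endswith n "nb" || PySem.Str.isIn "nb" n then
    true
  else if PySem.Str.isIn "trade" n then
    true
  else if PySem.Str.isIn "contract" n then
    true
  else
    -- set iteration: the loop's value (an "any") does not depend on iteration order
    STRONG_ID_TOKENS.any (fun tok => tok != "nb" && PySem.Str.isIn tok n)

-- ===== PORT B =====
def pvAltTokens : List (List Char) :=
  [['n','b'], ['t','r','a','d','e'], ['c','o','n','t','r','a','c','t'], ['d','e','a','l'],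
   ['o','r','d','e','r'], ['t','r','a','n','s','a','c','t','i','o','n'],
   ['p','o','s','i','t','i','o','n'], ['b','o','o','k','i','n','g']]

def pvDropChars : List Char := [' ', '-', '.', '/', '\\', '_']

-- one inner loop of B ("for s in …: if s[0] == ch: …"): returns (accepted, advanced suffixes)
def pvAdv (c : Char) : List (List Char) → Bool × List (List Char)
  | [] => (false, [])
  | s :: ss =>
    let r := pvAdv c ss
    match s with
    | [] => r            -- unreachable: states never contain the empty suffix
    | x :: rest =>
      if x = c then
        if rest = [] then (true, r.2)
        else (r.1, rest :: r.2)
      else r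

-- B's main loop over the characters, skipping separator characters
def pvAltGo (states : List (List Char)) : List Char → Bool
  | [] => false
  | c :: cs =>
    if pvDropChars.contains c then pvAltGo states cs
    else
      let a := pvAdv c states
      if a.1 then true
      else
        let b := pvAdv c pvAltTokens
        if b.1 then true
        else pvAltGo (a.2 ++ b.2) cs

def looks_like_strong_id_name_alt (col : String) : Bool :=
  pvAltGo [] (PySem.Chars.lower (PySem.Chars.strip col.toList))

-- ===== PRECONDITION & SPEC =====
def Spec_looks_like_strong_id_name (col : String) (out : Bool) : Prop := out = looks_like_strong_id_name_alt col
instance (col : String) (out : Bool) : Decidable (Spec_looks_like_strong_id_name col out) := by unfold Spec_looks_like_strong_id_name; infer_instance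

-- ===== CLAIM (what is proved, stated in full; the proofs are below) =====
def Claim_equal_looks_like_strong_id_name : Prop := ∀ (col : String), Dom_looks_like_strong_id_name col → Spec_looks_like_strong_id_name col (looks_like_strong_id_name col)

-- ===== LEMMAS AND PROOFS =====

-- str.replace(old, "") with a single-character old is a character filter
lemma pv_go_filter (c : Char) : ∀ (xs acc : List Char),
    PySem.Chars.replace.go [c] [] xs.length xs acc = acc.reverse ++ xs.filter (· ≠ c)
  | [], acc => by simp [PySem.Chars.replace.go]
  | x :: xs, acc => by
    simp only [List.length_cons, PySem.Chars.replace.go]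
    by_cases h : c = x
    · subst h; simp [pv_go_filter c xs acc]
    · simp [h, pv_go_filter c xs (x :: acc), Ne.symm h]

lemma pv_replace_filter (c : Char) (s : List Char) :
    PySem.Chars.replace s [c] [] = s.filter (· ≠ c) := by
  simp [PySem.Chars.replace, pv_go_filter]

-- A's normalized name, on the list side, is a character filter of lower(strip col)
def pvAltNorm (col : String) : List Char :=
  (PySem.Chars.lower (PySem.Chars.strip col.toList)).filter (fun c => !pvDropChars.contains c)

lemma pv_norm_eq (col : String) : (pvNormName col).toList = pvAltNorm col := by
  simp only [pvNormName, pvAltNorm, PySem.Str.toList_replace, PySem.Str.toList_lower,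
    PySem.Str.toList_strip]
  show PySem.Chars.replace (PySem.Chars.replace (PySem.Chars.replace (PySem.Chars.replace
    (PySem.Chars.replace (PySem.Chars.replace _ [' '] []) ['-'] []) ['.'] []) ['/'] [])
    ['\\'] []) ['_'] [] = _
  simp only [pv_replace_filter, List.filter_filter]
  apply List.filter_congr
  intro c _
  rw [Bool.eq_iff_iff]
  simp [pvDropChars]
  tauto

lemma pv_tokens_ne_nil : ∀ t ∈ pvAltTokens, t ≠ [] := by decide

lemma pv_set_tokens : (STRONG_ID_TOKENS : List String) =
  ["nb", "trade", "tradeid", "contract", "contractid", "contractnumber",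
   "deal", "dealid", "order", "orderid", "transaction", "transactionid",
   "position", "positionid", "booking", "bookingid"] := by decide

-- infix subsumption: a prefix of a substring token is itself a substring
lemma pv_sub {t1 t2 m : List Char} (h1 : t1 <+: t2) (h2 : t2 <:+: m) : t1 <:+: m :=
  h1.isInfix.trans h2

-- A's decision on the normalized name n equals "some effective token is a substring of n"
lemma pv_decision_eq (n : String) :
    (if n == "nb" || PySem.Str.startswith n "nb" || PySem.Str.endswith n "nb" || PySem.Str.isIn "nb" n then
      true
    else if PySem.Str.isIn "trade" n then true
    else if PySem.Str.isIn "contract" n then true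
    else STRONG_ID_TOKENS.any (fun tok => tok != "nb" && PySem.Str.isIn tok n))
    = pvAltTokens.any (fun t => PySem.Chars.isIn t n.toList) := by
  rw [Bool.eq_iff_iff]
  simp only [Bool.or_eq_true, beq_iff_eq, PySem.Str.startswith_eq, PySem.Str.endswith_eq,
    PySem.Str.isIn_eq, PySem.Chars.startswith_iff, PySem.Chars.endswith_iff,
    PySem.Chars.isIn_iff_infix, pv_set_tokens, pvAltTokens, List.any_cons, List.any_nil]
  split_ifs with h1 h2 h3
  · refine iff_of_true rfl (Or.inl ?_)
    rcases h1 with ((h | h) | h) | h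
    · rw [h]; decide
    · simpa using h.isInfix
    · simpa using h.isInfix
    · simpa using h
  · exact iff_of_true rfl (Or.inr (Or.inl (by simpa using h2)))
  · exact iff_of_true rfl (Or.inr (Or.inr (Or.inl (by simpa using h3))))
  · simp only [Bool.or_eq_true, Bool.and_eq_true, bne_iff_ne, ne_eq]
    simp [PySem.Chars.isIn_iff_infix]
    constructor
    · rintro (h|h|h|h|h|h|h|h|h|h|h|h|h|h|h)
      · exact Or.inr (Or.inl h)
      · exact Or.inr (Or.inl (pv_sub (by decide) h))
      · exact Or.inr (Or.inr (Or.inl h))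
      · exact Or.inr (Or.inr (Or.inl (pv_sub (by decide) h)))
      · exact Or.inr (Or.inr (Or.inl (pv_sub (by decide) h)))
      · exact Or.inr (Or.inr (Or.inr (Or.inl h)))
      · exact Or.inr (Or.inr (Or.inr (Or.inl (pv_sub (by decide) h))))
      · exact Or.inr (Or.inr (Or.inr (Or.inr (Or.inl h))))
      · exact Or.inr (Or.inr (Or.inr (Or.inr (Or.inl (pv_sub (by decide) h)))))
      · exact Or.inr (Or.inr (Or.inr (Or.inr (Or.inr (Or.inl h)))))
      · exact Or.inr (Or.inr (Or.inr (Or.inr (Or.inr (Or.inl (pv_sub (by decide) h))))))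
      · exact Or.inr (Or.inr (Or.inr (Or.inr (Or.inr (Or.inr (Or.inl h))))))
      · exact Or.inr (Or.inr (Or.inr (Or.inr (Or.inr (Or.inr (Or.inl (pv_sub (by decide) h)))))))
      · exact Or.inr (Or.inr (Or.inr (Or.inr (Or.inr (Or.inr (Or.inr h))))))
      · exact Or.inr (Or.inr (Or.inr (Or.inr (Or.inr (Or.inr (Or.inr (pv_sub (by decide) h)))))))
    · rintro (h|h|h|h|h|h|h|h)
      · exact absurd (Or.inr (by simpa using h)) h1
      · exact Or.inl h
      · exact Or.inr (Or.inr (Or.inl h))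
      · exact Or.inr (Or.inr (Or.inr (Or.inr (Or.inr (Or.inl h)))))
      · exact Or.inr (Or.inr (Or.inr (Or.inr (Or.inr (Or.inr (Or.inr (Or.inl h)))))))
      · exact Or.inr (Or.inr (Or.inr (Or.inr (Or.inr (Or.inr (Or.inr (Or.inr (Or.inr (Or.inl h)))))))))
      · exact Or.inr (Or.inr (Or.inr (Or.inr (Or.inr (Or.inr (Or.inr (Or.inr (Or.inr (Or.inr (Or.inr (Or.inl h)))))))))))
      · exact Or.inr (Or.inr (Or.inr (Or.inr (Or.inr (Or.inr (Or.inr (Or.inr (Or.inr (Or.inr (Or.inr (Or.inr (Or.inr (Or.inl h)))))))))))))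

-- characterization of pvAdv: its flag and the membership of its advanced-suffix list
lemma pvAdv_fst (c : Char) : ∀ ss : List (List Char),
    ((pvAdv c ss).1 = true ↔ [c] ∈ ss)
  | [] => by simp [pvAdv]
  | s :: ss => by
    have ih := pvAdv_fst c ss
    cases s with
    | nil => simpa [pvAdv] using ih.trans (by simp)
    | cons x rest =>
      simp only [pvAdv]
      by_cases hx : x = c
      · subst hx
        by_cases hr : rest = []
        · subst hr
          exact iff_of_true (by simp) (by simp)
        · simp only [ite_true, if_neg hr]
          rw [ih, List.mem_cons]
          constructor
          · exact Or.inr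
          · rintro (h | h)
            · exact absurd (List.cons.inj h).2 (Ne.symm hr)
            · exact h
      · simp only [if_neg hx]
        rw [ih, List.mem_cons]
        constructor
        · exact Or.inr
        · rintro (h | h)
          · exact absurd (List.cons.inj h).1.symm hx
          · exact h

lemma pvAdv_mem (c : Char) (r : List Char) : ∀ ss : List (List Char),
    (r ∈ (pvAdv c ss).2 ↔ (c :: r) ∈ ss ∧ r ≠ [])
  | [] => by simp [pvAdv]
  | s :: ss => by
    have ih := pvAdv_mem c r ss
    cases s with
    | nil => simpa [pvAdv] using ih.trans (by simp)
    | cons x rest =>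
      simp only [pvAdv]
      by_cases hx : x = c
      · subst hx
        by_cases hr : rest = []
        · subst hr
          simp only [ite_true]
          rw [ih, List.mem_cons]
          constructor
          · rintro ⟨h, hne⟩; exact ⟨Or.inr h, hne⟩
          · rintro ⟨h | h, hne⟩
            · exact absurd (List.cons.inj h).2 hne
            · exact ⟨h, hne⟩
        · simp only [ite_true, if_neg hr]
          rw [List.mem_cons, ih, List.mem_cons]
          constructor
          · rintro (h | ⟨h, hne⟩)
            · exact ⟨Or.inl (by rw [h]), h ▸ hr⟩
            · exact ⟨Or.inr h, hne⟩
          · rintro ⟨h | h, hne⟩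
            · exact Or.inl (List.cons.inj h).2
            · exact Or.inr ⟨h, hne⟩
      · simp only [if_neg hx]
        rw [ih, List.mem_cons]
        constructor
        · rintro ⟨h, hne⟩; exact ⟨Or.inr h, hne⟩
        · rintro ⟨h | h, hne⟩
          · exact absurd (List.cons.inj h).1.symm hx
          · exact ⟨h, hne⟩

-- the NFA pass accepts iff some active suffix is a prefix of the (filtered) remainder
-- or some token occurs in the (filtered) remainder
lemma pvAltGo_iff : ∀ (cs : List Char) (states : List (List Char)),
    (∀ s ∈ states, s ≠ []) →
    (pvAltGo states cs = true ↔
      (∃ s ∈ states, s <+: cs.filter (fun c => !pvDropChars.contains c)) ∨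
      ∃ t ∈ pvAltTokens, t <:+: cs.filter (fun c => !pvDropChars.contains c))
  | [], states => by
    intro hne
    simp only [pvAltGo, List.filter_nil]
    constructor
    · intro h; exact absurd h (by simp)
    · rintro (⟨s, hs, hp⟩ | ⟨t, ht, hp⟩)
      · exact absurd (List.prefix_nil.mp hp) (hne s hs)
      · exact absurd ((List.infix_nil).mp hp) (pv_tokens_ne_nil t ht)
  | c :: cs, states => by
    intro hne
    simp only [pvAltGo]
    by_cases hd : pvDropChars.contains c = true
    · rw [if_pos hd, List.filter_cons_of_neg (by simpa using hd)]
      exact pvAltGo_iff cs states hne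
    · rw [if_neg hd, List.filter_cons_of_pos (by simpa using hd)]
      have hnext : ∀ s ∈ (pvAdv c states).2 ++ (pvAdv c pvAltTokens).2, s ≠ [] := by
        intro s hs
        rcases List.mem_append.mp hs with h | h
        · exact ((pvAdv_mem c s states).mp h).2
        · exact ((pvAdv_mem c s pvAltTokens).mp h).2
      by_cases h1 : (pvAdv c states).1 = true
      · rw [if_pos h1]
        exact iff_of_true rfl (Or.inl ⟨[c], (pvAdv_fst c states).mp h1, by simp⟩)
      · rw [if_neg h1]
        by_cases h2 : (pvAdv c pvAltTokens).1 = true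
        · rw [if_pos h2]
          exact iff_of_true rfl (Or.inr ⟨[c], (pvAdv_fst c pvAltTokens).mp h2,
            List.IsPrefix.isInfix (by simp)⟩)
        · rw [if_neg h2, pvAltGo_iff cs _ hnext]
          constructor
          · rintro (⟨s, hs, hp⟩ | ⟨t, ht, hp⟩)
            · rcases List.mem_append.mp hs with h | h
              · obtain ⟨hmem, -⟩ := (pvAdv_mem c s states).mp h
                exact Or.inl ⟨c :: s, hmem, by simpa using hp⟩
              · obtain ⟨hmem, -⟩ := (pvAdv_mem c s pvAltTokens).mp h
                exact Or.inr ⟨c :: s, hmem, List.IsPrefix.isInfix (by simpa using hp)⟩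
            · exact Or.inr ⟨t, ht, List.infix_cons hp⟩
          · rintro (⟨s, hs, hp⟩ | ⟨t, ht, hp⟩)
            · cases s with
              | nil => exact absurd rfl (hne [] hs)
              | cons x rest =>
                obtain ⟨hx, hp'⟩ := List.cons_prefix_cons.mp hp
                subst hx
                cases rest with
                | nil => exact absurd ((pvAdv_fst x states).mpr hs) h1
                | cons y r =>
                  exact Or.inl ⟨y :: r, List.mem_append_left _
                    ((pvAdv_mem x (y :: r) states).mpr ⟨hs, by simp⟩), hp'⟩
            · rcases (List.infix_cons_iff).mp hp with hpre | hinf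
              · cases t with
                | nil => exact absurd rfl (pv_tokens_ne_nil [] ht)
                | cons x rest =>
                  obtain ⟨hx, hp'⟩ := List.cons_prefix_cons.mp hpre
                  subst hx
                  cases rest with
                  | nil => exact absurd ((pvAdv_fst x pvAltTokens).mpr ht) h2
                  | cons y r =>
                    exact Or.inl ⟨y :: r, List.mem_append_right _
                      ((pvAdv_mem x (y :: r) pvAltTokens).mpr ⟨ht, by simp⟩), hp'⟩
              · exact Or.inr ⟨t, ht, hinf⟩

lemma pv_A_eq_B (col : String) :
    looks_like_strong_id_name col = looks_like_strong_id_name_alt col := by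
  have hB : looks_like_strong_id_name_alt col
      = pvAltTokens.any (fun t => PySem.Chars.isIn t (pvAltNorm col)) := by
    rw [Bool.eq_iff_iff, looks_like_strong_id_name_alt,
      pvAltGo_iff (PySem.Chars.lower (PySem.Chars.strip col.toList)) [] (by simp),
      List.any_eq_true]
    simp only [List.not_mem_nil, false_and, exists_false, false_or, pvAltNorm]
    constructor
    · rintro ⟨t, ht, h⟩; exact ⟨t, ht, (PySem.Chars.isIn_iff_infix _ _).mpr h⟩
    · rintro ⟨t, ht, h⟩; exact ⟨t, ht, (PySem.Chars.isIn_iff_infix _ _).mp h⟩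
  rw [hB, looks_like_strong_id_name]
  have := pv_decision_eq (pvNormName col)
  rw [pv_norm_eq col] at this
  exact this

-- ===== VERDICT (by name: the statement is the Claim_ definition above) =====
theorem looks_like_strong_id_name_spec : Claim_equal_looks_like_strong_id_name := by
  intro col _
  exact pv_A_eq_B col
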